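-- pv_equiv track=rewrite | github.com/nicwulab/SARS-CoV-2_Abs | code/clonotype_assignment.py | clean_clonotype
-- ===== SOURCE A (Python) =====
-- def clean_clonotype(clonotype_dict):
--   new_dict = {}
--   count = 0
--   for ID in sorted(clonotype_dict.keys(), key=lambda x:len(clonotype_dict[x]), reverse=True):
--      count += 1
--      for Ab in clonotype_dict[ID]:
--        new_dict[Ab] = count
--   return new_dict
-- ===== SOURCE B (Python) =====
-- def clean_clonotype(clonotype_dict):
--   buckets = {}
--   for ID, members in clonotype_dict.items():
--     buckets.setdefault(len(members), []).append(ID)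
--   ordered = [ID for size in sorted(buckets, reverse=True) for ID in buckets[size]]
--   pairs = [(Ab, rank) for rank, ID in enumerate(ordered, 1) for Ab in clonotype_dict[ID]]
--   return dict(pairs)
-- ===== Notes on version B (the rewrite author's own statement) =====
-- stated objective: alternative
-- what changed: Replaces A's comparison sort of all IDs plus counter-carrying nested mutation loops by staged passes: bucket IDs by group size in a dict, sort only the distinct sizes descending, flatten to an ordered ID list, enumerate it into a flat (Ab, rank) pair list, and build the result with one dict() call.
import Mathlib
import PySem

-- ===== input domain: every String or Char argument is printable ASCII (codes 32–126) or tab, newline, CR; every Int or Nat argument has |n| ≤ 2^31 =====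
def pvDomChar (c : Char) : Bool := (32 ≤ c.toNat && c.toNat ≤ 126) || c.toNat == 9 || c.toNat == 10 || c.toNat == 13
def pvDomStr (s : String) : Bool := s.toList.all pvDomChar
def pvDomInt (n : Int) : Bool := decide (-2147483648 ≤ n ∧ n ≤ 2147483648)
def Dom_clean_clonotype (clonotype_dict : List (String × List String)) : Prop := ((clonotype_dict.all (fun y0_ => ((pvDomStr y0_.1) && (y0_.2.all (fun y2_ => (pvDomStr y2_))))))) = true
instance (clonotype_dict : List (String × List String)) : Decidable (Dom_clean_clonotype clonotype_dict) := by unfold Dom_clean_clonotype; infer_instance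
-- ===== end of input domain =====

-- B replaces A's comparison sort of all IDs and its counter-carrying nested mutation loop
-- by staged passes: bucket IDs by group size, sort only the distinct sizes descending,
-- flatten to an ordered ID list, enumerate it to build the flat (Ab, rank) pair list,
-- and construct the result dict in one dict() call (objective: alternative decomposition).

-- ===== PORT A =====
-- A: sorted(clonotype_dict.keys(), key=lambda x: len(clonotype_dict[x]), reverse=True),
-- then count += 1 per ID and new_dict[Ab] = count for each Ab.
def clean_clonotype (clonotype_dict : List (String × List String)) : List (String × Int) :=
  let d := PySem.Dict.ofList clonotype_dict
  let ids := PySem.List.sorted d.keys (fun x => ((d.getD x []).length : Int)) true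
  (ids.foldl
    (fun (st : Int × PySem.Dict String Int) ID =>
      (st.1 + 1, (d.getD ID []).foldl (fun nd Ab => nd.insert Ab (st.1 + 1)) st.2))
    (0, PySem.Dict.empty)).2.items

-- ===== PORT B =====
-- B: buckets.setdefault(len(members), []).append(ID) is the in-place list extension
-- Dict.modify size [] (· ++ [ID]); the two comprehensions are flatMaps; dict(pairs) is Dict.ofList.
def clean_clonotype_alt (clonotype_dict : List (String × List String)) : List (String × Int) :=
  let d := PySem.Dict.ofList clonotype_dict
  let buckets := d.items.foldl
      (fun (b : PySem.Dict Int (List String)) p =>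
        b.modify ((p.2.length : Int)) [] (fun l => l ++ [p.1]))
      PySem.Dict.empty
  let ordered := (PySem.List.sorted buckets.keys (fun x => x) true).flatMap
      (fun size => buckets.getD size [])
  let pairs := (PySem.List.enumerate ordered 1).flatMap
      (fun q => (d.getD q.2 []).map (fun Ab => (Ab, q.1)))
  (PySem.Dict.ofList pairs).items

-- ===== PRECONDITION & SPEC =====
def Spec_clean_clonotype (clonotype_dict : List (String × List String)) (out : List (String × Int)) : Prop := out = clean_clonotype_alt clonotype_dict
instance (clonotype_dict : List (String × List String)) (out : List (String × Int)) : Decidable (Spec_clean_clonotype clonotype_dict out) := by unfold Spec_clean_clonotype; infer_instance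

-- ===== CLAIM (what is proved, stated in full; the proofs are below) =====
def Claim_equal_clean_clonotype : Prop := ∀ (clonotype_dict : List (String × List String)), Dom_clean_clonotype clonotype_dict → Spec_clean_clonotype clonotype_dict (clean_clonotype clonotype_dict)

-- ===== LEMMAS AND PROOFS =====

-- insertBy passes over a block in which no element triggers `before`.
theorem pv_insertBy_append_not_before {α : Type} (before : α → α → Bool) (x : α)
    (l t : List α) (h : ∀ y ∈ l, before x y = false) :
    PySem.List.insertBy before x (l ++ t) = l ++ PySem.List.insertBy before x t := by
  induction l with
  | nil => simp
  | cons y ys ih =>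
    have hy : before x y = false := h y (by simp)
    simp [PySem.List.insertBy, hy, ih (fun z hz => h z (by simp [hz]))]

-- Inserting x into a list bucketed by strictly decreasing key values extends x's bucket.
theorem pv_insertBy_flatMap_filter {α : Type} (key : α → Int) (x : α) (xs : List α)
    (ks : List Int) (hpw : ks.Pairwise (· > ·)) (hx : key x ∈ ks) :
    PySem.List.insertBy (fun a b => decide (key b < key a)) x
        (ks.flatMap (fun k => xs.filter (fun y => key y == k)))
      = ks.flatMap (fun k => (xs ++ [x]).filter (fun y => key y == k)) := by
  induction ks with
  | nil => simp at hx
  | cons k ks ih =>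
    have hpw' := (List.pairwise_cons.mp hpw).2
    have hkgt : ∀ j ∈ ks, k > j := (List.pairwise_cons.mp hpw).1
    by_cases hk : key x = k
    · -- x joins the bucket of k; all later buckets have strictly smaller keys
      have hblock : ∀ y ∈ xs.filter (fun y => key y == k),
          (fun a b => decide (key b < key a)) x y = false := by
        intro y hy
        have : key y = k := by simpa using (List.of_mem_filter hy)
        simp [this, hk]
      rw [List.flatMap_cons, pv_insertBy_append_not_before _ _ _ _ hblock]
      have hrest : ks.flatMap (fun k => (xs ++ [x]).filter (fun y => key y == k))
          = ks.flatMap (fun k => xs.filter (fun y => key y == k)) := by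
        apply List.flatMap_congr
        intro j hj
        have : key x ≠ j := by
          have := hkgt j hj; omega
        simp [List.filter_append, this]
      rw [List.flatMap_cons, hrest]
      have hxk : (xs ++ [x]).filter (fun y => key y == k)
          = xs.filter (fun y => key y == k) ++ [x] := by
        simp [List.filter_append, hk]
      rw [hxk]
      -- now: insertBy x rest = [x] ++ rest, where every element of rest has key < key x
      cases hrest2 : ks.flatMap (fun k => xs.filter (fun y => key y == k)) with
      | nil => simp [PySem.List.insertBy]
      | cons z zs =>
        have hz : z ∈ ks.flatMap (fun k => xs.filter (fun y => key y == k)) := by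
          rw [hrest2]; simp
        obtain ⟨j, hj, hzj⟩ := List.mem_flatMap.mp hz
        have hzk : key z = j := by simpa using (List.of_mem_filter hzj)
        have : key z < key x := by have := hkgt j hj; omega
        simp [PySem.List.insertBy, this]
    · -- x belongs to a later bucket; it passes over the k-bucket unchanged
      have hx' : key x ∈ ks := by
        rcases List.mem_cons.mp hx with h | h
        · exact absurd h hk
        · exact h
      have hblock : ∀ y ∈ xs.filter (fun y => key y == k),
          (fun a b => decide (key b < key a)) x y = false := by
        intro y hy
        have hyk : key y = k := by simpa using (List.of_mem_filter hy)
        have : k > key x := hkgt _ hx'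
        simp [hyk]; omega
      rw [List.flatMap_cons, pv_insertBy_append_not_before _ _ _ _ hblock,
          ih hpw' hx', List.flatMap_cons]
      have : (xs ++ [x]).filter (fun y => key y == k) = xs.filter (fun y => key y == k) := by
        simp [List.filter_append, hk]
      rw [this]

-- Python's stable reverse sort is the concatenation of the key-value buckets,
-- taken along any strictly decreasing list of keys covering the list.
theorem pv_sorted_rev_eq_flatMap_filter {α : Type} (key : α → Int) (l : List α)
    (ks : List Int) (hpw : ks.Pairwise (· > ·)) (hmem : ∀ x ∈ l, key x ∈ ks) :
    PySem.List.sorted l key true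
      = ks.flatMap (fun k => l.filter (fun y => key y == k)) := by
  induction l using List.reverseRecOn with
  | nil => simp [PySem.List.sorted]
  | append_singleton xs x ih =>
    have hxs : ∀ y ∈ xs, key y ∈ ks := fun y hy => hmem y (by simp [hy])
    have hx : key x ∈ ks := hmem x (by simp)
    rw [PySem.List.sorted_rev_eq_foldl_insertBy, List.foldl_append, List.foldl_cons,
        List.foldl_nil, ← PySem.List.sorted_rev_eq_foldl_insertBy, ih hxs]
    exact pv_insertBy_flatMap_filter key x xs ks hpw hx

-- The ID order A produces equals the bucketed order B produces.
theorem pv_order_eq (d : PySem.Dict String (List String)) (hnd : d.keys.Nodup) :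
    PySem.List.sorted d.keys (fun x => ((d.getD x []).length : Int)) true
      = (PySem.List.sorted
            (List.foldl (fun (b : PySem.Dict Int (List String)) p =>
              b.modify ((p.2.length : Int)) [] (fun l => l ++ [p.1])) PySem.Dict.empty d.items).keys
            (fun x => x) true).flatMap
          (fun s => (List.foldl (fun (b : PySem.Dict Int (List String)) p =>
              b.modify ((p.2.length : Int)) [] (fun l => l ++ [p.1])) PySem.Dict.empty d.items).getD s []) := by
  set buckets := List.foldl (fun (b : PySem.Dict Int (List String)) p =>
      b.modify ((p.2.length : Int)) [] (fun l => l ++ [p.1])) PySem.Dict.empty d.items with hb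
  -- buckets' keys
  have hbk : buckets.keys = PySem.Set.ofList (d.items.map (fun p => ((p.2.length : Int)))) := by
    rw [hb, PySem.Dict.keys_foldl_modify_key d.items (fun p => ((p.2.length : Int))) []
        (fun _ p => (fun l => l ++ [p.1])) PySem.Dict.empty]
    simp [PySem.Set.update_eq_append_filter, PySem.Set.contains, PySem.Dict.keys_empty]
  have hbnd : buckets.keys.Nodup := by
    rw [hbk]; exact PySem.Set.nodup_ofList _
  set sizes := PySem.List.sorted buckets.keys (fun x => x) true with hsz
  have hsnd : sizes.Nodup :=
    ((PySem.List.sorted_perm buckets.keys (fun x => x) true).symm).nodup hbnd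
  have hspw : sizes.Pairwise (· > ·) := by
    have h1 := PySem.List.sorted_pairwise_rev buckets.keys (fun x => x)
    have := List.Pairwise.and h1 hsnd
    exact this.imp (fun {a b} h => lt_of_le_of_ne h.1 (Ne.symm h.2))
  -- each bucket lookup
  have hget : ∀ k : Int, buckets.getD k []
      = (d.items.filter (fun p => ((p.2.length : Int)) == k)).map (fun p => p.1) := by
    intro k
    have : buckets = (d.items.map (fun p => (((p.2.length : Int)), p.1))).foldl
        (fun b q => b.modify q.1 [] (fun l => l ++ [q.2])) PySem.Dict.empty := by
      rw [hb, List.foldl_map]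
    rw [this, PySem.Dict.getD_foldl_modify_append]
    simp [List.filter_map, List.map_map, Function.comp_def]
  -- membership of each key's size in sizes
  have hmem : ∀ id ∈ d.keys, ((d.getD id []).length : Int) ∈ sizes := by
    intro id hid
    have : ∃ p ∈ d.items, p.1 = id := by
      simpa [PySem.Dict.keys, List.mem_map] using hid
    obtain ⟨p, hp, hp1⟩ := this
    have hgd : d.getD id [] = p.2 := by
      subst hp1
      exact PySem.Dict.getD_of_mem_items d (by exact hp) hnd []
    rw [hsz, PySem.List.mem_sorted, hbk, PySem.Set.mem_ofList, hgd]
    exact List.mem_map.mpr ⟨p, hp, rfl⟩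
  -- apply the bucket characterisation of the stable reverse sort
  rw [pv_sorted_rev_eq_flatMap_filter (fun x => ((d.getD x []).length : Int)) d.keys sizes hspw hmem]
  apply List.flatMap_congr
  intro k hk
  rw [hget k]
  have hkeys : d.keys = d.items.map (fun p => p.1) := rfl
  rw [hkeys, List.filter_map]
  congr 1
  apply List.filter_congr
  intro p hp
  have hgd : d.getD p.1 [] = p.2 := PySem.Dict.getD_of_mem_items d (by exact hp) hnd []
  simp [hgd]

-- A's counter-carrying fold over an ID list equals the fold of inserts over
-- B's enumerated flat pair list (the counter becoming the enumeration index).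
theorem pv_rank_fold (d : PySem.Dict String (List String)) :
    ∀ (ids : List String) (c : Int) (nd : PySem.Dict String Int),
    (ids.foldl
      (fun (st : Int × PySem.Dict String Int) ID =>
        (st.1 + 1, (d.getD ID []).foldl (fun nd Ab => nd.insert Ab (st.1 + 1)) st.2))
      (c, nd)).2
      = ((PySem.List.enumerate ids (c + 1)).flatMap
          (fun q => (d.getD q.2 []).map (fun Ab => (Ab, q.1)))).foldl
          (fun m p => m.insert p.1 p.2) nd := by
  intro ids
  induction ids with
  | nil => intro c nd; simp [PySem.List.enumerate_nil]
  | cons ID rest ih =>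
    intro c nd
    rw [List.foldl_cons, PySem.List.enumerate_cons, List.flatMap_cons, List.foldl_append,
        List.foldl_map]
    exact ih (c + 1) _

-- ===== VERDICT (by name: the statement is the Claim_ definition above) =====
theorem clean_clonotype_spec : Claim_equal_clean_clonotype := by
  intro clonotype_dict _
  show clean_clonotype clonotype_dict = clean_clonotype_alt clonotype_dict
  simp only [clean_clonotype, clean_clonotype_alt]
  rw [pv_order_eq (PySem.Dict.ofList clonotype_dict) (PySem.Dict.nodup_keys_ofList clonotype_dict),
      pv_rank_fold (PySem.Dict.ofList clonotype_dict) _ 0 PySem.Dict.empty]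
  rfl
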